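-- pv_equiv track=rewrite | github.com/mendyraul/MIAFlightTrack | flaskr/db.py | process_flights
-- ===== SOURCE A (Python) =====
-- def process_flights(response):
--     flights = []
--     for schedule in response['response']:
--         flight_info = {
--             'airline_iata': schedule.get('airline_iata'),
--             'flight_iata': schedule.get('flight_iata'),
--             'status': schedule.get('status'),
--             'dep_iata': schedule.get('dep_iata'),
--             'dep_time': schedule.get('dep_time'),
--             'dep_estimated': schedule.get('dep_estimated'),
--             'dep_actual': schedule.get('dep_actual'),
--             'arr_iata': schedule.get('arr_iata'),
--             'arr_time': schedule.get('arr_time'),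
--             'arr_estimated': schedule.get('arr_estimated'),
--             'arr_actual': schedule.get('arr_actual'),
--             'duration': schedule.get('duration')
--         }
--         flights.append(flight_info)
--     return flights
-- ===== SOURCE B (Python) =====
-- FIELDS = ['airline_iata', 'flight_iata', 'status', 'dep_iata', 'dep_time',
--           'dep_estimated', 'dep_actual', 'arr_iata', 'arr_time',
--           'arr_estimated', 'arr_actual', 'duration']
--
--
-- def process_flights(response):
--     # Column-major, two-stage: first build one column of (key, value) pairs per
--     # field, then transpose the columns into one dict per schedule.
--     schedules = list(response['response'])
--     columns = [[(k, s.get(k)) for s in schedules] for k in FIELDS]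
--     return [dict(col[i] for col in columns) for i in range(len(schedules))]
-- ===== Notes on version B (the rewrite author's own statement) =====
-- stated objective: alternative
-- what changed: A builds each flight dict in one row-major pass; B works column-major in two stages: it first extracts one column of (field, value) pairs per field across all schedules, then transposes the columns, assembling each result dict by indexing every column at position i.
import Mathlib
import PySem

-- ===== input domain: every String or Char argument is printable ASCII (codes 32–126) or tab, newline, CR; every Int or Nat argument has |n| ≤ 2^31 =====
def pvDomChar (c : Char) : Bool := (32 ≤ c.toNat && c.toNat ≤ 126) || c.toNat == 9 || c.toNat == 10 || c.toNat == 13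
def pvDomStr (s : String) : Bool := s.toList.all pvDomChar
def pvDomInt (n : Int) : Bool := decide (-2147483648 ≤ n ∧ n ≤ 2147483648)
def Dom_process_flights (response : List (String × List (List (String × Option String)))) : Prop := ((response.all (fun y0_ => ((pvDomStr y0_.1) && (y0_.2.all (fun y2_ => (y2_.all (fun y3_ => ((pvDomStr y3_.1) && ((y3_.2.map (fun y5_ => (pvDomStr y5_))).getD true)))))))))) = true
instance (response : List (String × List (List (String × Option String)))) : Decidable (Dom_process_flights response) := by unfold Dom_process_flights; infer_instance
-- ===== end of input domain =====

-- B replaces A's single row-major accumulator loop by a column-major two-stage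
-- computation (one column per field, then a transpose); alternative decomposition,
-- same cost. Equivalence is about the return value; neither version mutates.

-- ===== PORT A =====
-- schedule.get(k): first match in the association list, None if absent (value type is Option String)
def pvSchedGet (schedule : List (String × Option String)) (k : String) : Option String :=
  (List.lookup k schedule).join

def process_flights (response : List (String × List (List (String × Option String)))) : List (List (String × Option String)) :=
  match List.lookup "response" response with
  | none => []   -- Python raises KeyError here; excluded by Pre_
  | some schedules =>
    schedules.foldl (fun flights schedule =>
      flights ++ [[("airline_iata", pvSchedGet schedule "airline_iata"),
                   ("flight_iata", pvSchedGet schedule "flight_iata"),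
                   ("status", pvSchedGet schedule "status"),
                   ("dep_iata", pvSchedGet schedule "dep_iata"),
                   ("dep_time", pvSchedGet schedule "dep_time"),
                   ("dep_estimated", pvSchedGet schedule "dep_estimated"),
                   ("dep_actual", pvSchedGet schedule "dep_actual"),
                   ("arr_iata", pvSchedGet schedule "arr_iata"),
                   ("arr_time", pvSchedGet schedule "arr_time"),
                   ("arr_estimated", pvSchedGet schedule "arr_estimated"),
                   ("arr_actual", pvSchedGet schedule "arr_actual"),
                   ("duration", pvSchedGet schedule "duration")]]) []

-- ===== PORT B =====
def pvFields : List String :=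
  ["airline_iata", "flight_iata", "status", "dep_iata", "dep_time",
   "dep_estimated", "dep_actual", "arr_iata", "arr_time",
   "arr_estimated", "arr_actual", "duration"]

-- col[i] in Source B is always in range (each column has length = schedules.length),
-- so the getD default is never reached; dict(pairs) over distinct keys = the pair list.
def process_flights_alt (response : List (String × List (List (String × Option String)))) : List (List (String × Option String)) :=
  match List.lookup "response" response with
  | none => []
  | some schedules =>
    let columns := pvFields.map (fun k => schedules.map (fun s => (k, pvSchedGet s k)))
    (List.range schedules.length).map (fun i => columns.map (fun col => col.getD i ("", none)))

-- ===== PRECONDITION & SPEC =====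
-- A raises KeyError when the 'response' key is missing; exactly those inputs are excluded.
def Pre_process_flights (response : List (String × List (List (String × Option String)))) : Prop :=
  (List.lookup "response" response).isSome = true
instance (response : List (String × List (List (String × Option String)))) : Decidable (Pre_process_flights response) := by unfold Pre_process_flights; infer_instance
def pvWitness_process_flights : (List (String × List (List (String × Option String)))) :=
  [("response", [[("airline_iata", some "AA")], []])]
def Spec_process_flights (response : List (String × List (List (String × Option String)))) (out : List (List (String × Option String))) : Prop := out = process_flights_alt response
instance (response : List (String × List (List (String × Option String)))) (out : List (List (String × Option String))) : Decidable (Spec_process_flights response out) := by unfold Spec_process_flights; infer_instance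

-- ===== CLAIM =====
def Claim_equal_process_flights : Prop := ∀ (response : List (String × List (List (String × Option String)))), Dom_process_flights response → Pre_process_flights response → Spec_process_flights response (process_flights response)

-- ===== LEMMAS AND PROOFS =====
theorem foldl_append_singleton {α β : Type} (f : α → β) (xs : List α) (acc : List β) :
    xs.foldl (fun l x => l ++ [f x]) acc = acc ++ xs.map f := by
  induction xs generalizing acc with
  | nil => simp
  | cons x xs ih => simp [List.foldl, ih, List.append_assoc]

-- transposing the columns back gives the row-major map
theorem range_map_getD {α β : Type} (xs : List α) (f : α → β) (d : α) :
    (List.range xs.length).map (fun i => f (xs.getD i d)) = xs.map f := by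
  apply List.ext_getElem
  · simp
  · intro i h1 h2
    simp at h1
    simp [List.getD_eq_getElem?_getD, List.getElem?_eq_getElem h1]

theorem columns_transpose (schedules : List (List (String × Option String))) :
    (List.range schedules.length).map (fun i =>
      (pvFields.map (fun k => schedules.map (fun s => (k, pvSchedGet s k)))).map
        (fun col => col.getD i ("", none)))
    = schedules.map (fun s => pvFields.map (fun k => (k, pvSchedGet s k))) := by
  rw [← range_map_getD schedules (fun s => pvFields.map (fun k => (k, pvSchedGet s k))) []]
  apply List.ext_getElem
  · simp
  · intro i h1 h2
    simp only [List.getElem_map, List.getElem_range, List.map_map]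
    apply List.map_congr_left
    intro k _
    have hi : i < schedules.length := by simpa using h1
    simp [List.getD_eq_getElem?_getD, List.getElem?_eq_getElem hi]

-- ===== VERDICT =====
theorem process_flights_spec : Claim_equal_process_flights := by
  intro response _ _
  unfold Spec_process_flights process_flights process_flights_alt
  cases List.lookup "response" response with
  | none => rfl
  | some schedules =>
    simp only [foldl_append_singleton, List.nil_append, columns_transpose]
    rfl
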